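-- pv_equiv track=rewrite | github.com/davidmeer20/rankrocket_react | src/py_utils.py | get_drilldown_high
-- ===== SOURCE A (Python) =====
-- def get_drilldown_high(data):
--     types = {
--         'Heading': ['H1', 'H2'],
--         'Canonical': ['Canonical'],
--         'Meta Description': ['Meta Description']
--     }
--     drilldown = {label: 0 for label in types}
--
--     for page in data:
--         for issue in page.get('issues', []):
--             issue_type = issue.get('type')
--             severity = issue.get('severity')
--             for label, keys in types.items():
--                 if issue_type in keys and severity == 'HIGH':
--                     drilldown[label] += 1
--
--     return drilldown
-- ===== SOURCE B (Python) =====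
-- def get_drilldown_high(data):
--     # One pass: count HIGH-severity issues per raw issue type, then project onto labels.
--     counts = {}
--     for page in data:
--         for issue in page.get('issues', []):
--             if issue.get('severity') == 'HIGH':
--                 t = issue.get('type')
--                 counts[t] = counts.get(t, 0) + 1
--     return {
--         'Heading': counts.get('H1', 0) + counts.get('H2', 0),
--         'Canonical': counts.get('Canonical', 0),
--         'Meta Description': counts.get('Meta Description', 0),
--     }
-- ===== Notes on version B (the rewrite author's own statement) =====
-- stated objective: alternative
-- what changed: B replaces A's per-issue inner loop over the fixed label table by a single counting pass (frequency table of HIGH issue types) followed by a direct projection onto the three labels.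
import Mathlib
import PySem

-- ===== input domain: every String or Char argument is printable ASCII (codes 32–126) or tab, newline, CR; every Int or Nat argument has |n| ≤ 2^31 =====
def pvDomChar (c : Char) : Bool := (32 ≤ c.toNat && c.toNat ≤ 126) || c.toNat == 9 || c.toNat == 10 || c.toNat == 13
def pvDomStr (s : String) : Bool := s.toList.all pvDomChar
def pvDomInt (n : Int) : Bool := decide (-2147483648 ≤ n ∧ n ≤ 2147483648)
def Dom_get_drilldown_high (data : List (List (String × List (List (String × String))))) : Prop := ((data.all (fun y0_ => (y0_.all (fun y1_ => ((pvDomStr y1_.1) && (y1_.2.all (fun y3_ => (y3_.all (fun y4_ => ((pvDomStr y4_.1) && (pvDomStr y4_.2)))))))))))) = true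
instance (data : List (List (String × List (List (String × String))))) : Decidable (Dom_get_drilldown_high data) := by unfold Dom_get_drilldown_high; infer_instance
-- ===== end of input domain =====

-- B counts HIGH issues per raw type in one pass and then projects onto the three labels,
-- instead of A's per-issue scan of the fixed label table (objective: alternative decomposition).


-- ===== PORT A =====
def get_drilldown_high (data : List (List (String × List (List (String × String))))) : List (String × Int) :=
  let types : PySem.Dict String (List String) :=
    PySem.Dict.ofList [("Heading", ["H1", "H2"]), ("Canonical", ["Canonical"]),
      ("Meta Description", ["Meta Description"])]
  -- {label: 0 for label in types}
  let drilldown : PySem.Dict String Int :=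
    types.keys.foldl (fun d label => d.insert label 0) PySem.Dict.empty
  let final : PySem.Dict String Int :=
    data.foldl (fun dr page =>
      ((PySem.Dict.ofList page).getD "issues" []).foldl (fun dr issue =>
        let issue_type := (PySem.Dict.ofList issue).get? "type"
        let severity := (PySem.Dict.ofList issue).get? "severity"
        types.items.foldl (fun dr lk =>
          -- 'issue_type in keys' (None is never contained in a list of strings) and severity == 'HIGH'
          if (match issue_type with | some t => lk.2.contains t | none => false)
              && (severity == some "HIGH")
          then dr.modify lk.1 0 (· + 1) else dr) dr) dr) drilldown
  final.items

-- ===== PORT B =====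
def get_drilldown_high_alt (data : List (List (String × List (List (String × String))))) : List (String × Int) :=
  let counts : PySem.Dict (Option String) Int :=
    data.foldl (fun c page =>
      ((PySem.Dict.ofList page).getD "issues" []).foldl (fun c issue =>
        if (PySem.Dict.ofList issue).get? "severity" == some "HIGH"
        then c.modify ((PySem.Dict.ofList issue).get? "type") 0 (· + 1)
        else c) c) PySem.Dict.empty
  [("Heading", counts.getD (some "H1") 0 + counts.getD (some "H2") 0),
   ("Canonical", counts.getD (some "Canonical") 0),
   ("Meta Description", counts.getD (some "Meta Description") 0)]

-- ===== PRECONDITION & SPEC =====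
def Spec_get_drilldown_high (data : List (List (String × List (List (String × String))))) (out : List (String × Int)) : Prop := out = get_drilldown_high_alt data
instance (data : List (List (String × List (List (String × String))))) (out : List (String × Int)) : Decidable (Spec_get_drilldown_high data out) := by unfold Spec_get_drilldown_high; infer_instance

-- ===== CLAIM (what is proved, stated in full; the proofs are below) =====
def Claim_equal_get_drilldown_high : Prop := ∀ (data : List (List (String × List (List (String × String))))), Dom_get_drilldown_high data → Spec_get_drilldown_high data (get_drilldown_high data)

-- ===== LEMMAS AND PROOFS =====

-- the 'issues' list of a page, and the type/severity entries of an issue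
def pvIss (page : List (String × List (List (String × String)))) : List (List (String × String)) :=
  (PySem.Dict.ofList page).getD "issues" []
def pvTyp (issue : List (String × String)) : Option String := (PySem.Dict.ofList issue).get? "type"
def pvSev (issue : List (String × String)) : Option String := (PySem.Dict.ofList issue).get? "severity"

-- A's drilldown dict always has exactly the three label keys
def pvMk3 (a b c : Int) : PySem.Dict String Int :=
  PySem.Dict.mk [("Heading", a), ("Canonical", b), ("Meta Description", c)]

-- does `issue` count towards key `k` in B's counter (severity HIGH and type = k)?
def pvHit (k : Option String) (issue : List (String × String)) : Bool :=
  (pvSev issue == some "HIGH") && (pvTyp issue == k)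

-- how often key k is hit across all issues of all pages
def pvTot (data : List (List (String × List (List (String × String))))) (k : Option String) : Int :=
  ((data.flatMap pvIss).countP (pvHit k) : Int)

-- A's inner label loop, named for the proofs (definitionally the loop in the port)
def pvStepA (dr : PySem.Dict String Int) (issue : List (String × String)) : PySem.Dict String Int :=
  [("Heading", ["H1", "H2"]), ("Canonical", ["Canonical"]),
   ("Meta Description", ["Meta Description"])].foldl (fun dr (lk : String × List String) =>
    if (match pvTyp issue with | some t => lk.2.contains t | none => false)
        && (pvSev issue == some "HIGH")
    then dr.modify lk.1 0 (· + 1) else dr) dr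

-- Python's 'x in l' for an Option against a list of strings
lemma pvMatch (o : Option String) (l : List String) :
    (match o with | some t => l.contains t | none => false) = l.any (fun s => o == some s) := by
  cases o with
  | none => simp
  | some t =>
    induction l with
    | nil => simp
    | cons h tl ih => cases hb : t == h <;> simp_all

-- A's inner label loop on one issue, applied to the three-key dict
lemma pvA_step (issue : List (String × String)) (a b c : Int) :
    pvStepA (pvMk3 a b c) issue
    = pvMk3 (a + if pvHit (some "H1") issue || pvHit (some "H2") issue then 1 else 0)
            (b + if pvHit (some "Canonical") issue then 1 else 0)
            (c + if pvHit (some "Meta Description") issue then 1 else 0) := by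
  simp only [pvStepA, List.foldl, pvMatch, pvHit, List.any_cons, List.any_nil, Bool.or_false]
  by_cases hs : pvSev issue = some "HIGH" <;>
    by_cases h1 : pvTyp issue = some "H1" <;> by_cases h2 : pvTyp issue = some "H2" <;>
    by_cases h3 : pvTyp issue = some "Canonical" <;>
    by_cases h4 : pvTyp issue = some "Meta Description" <;>
    simp_all [pvMk3, PySem.Dict.modify, PySem.Dict.getD, PySem.Dict.get?, PySem.Dict.insert]

-- A's issue loop over one page
lemma pvA_issues (issues : List (List (String × String))) (a b c : Int) :
    (issues.foldl (fun dr issue => pvStepA dr issue) (pvMk3 a b c))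
    = pvMk3 (a + ((issues.countP (fun i => pvHit (some "H1") i || pvHit (some "H2") i)) : Int))
            (b + ((issues.countP (pvHit (some "Canonical"))) : Int))
            (c + ((issues.countP (pvHit (some "Meta Description"))) : Int)) := by
  induction issues generalizing a b c with
  | nil => simp
  | cons hd tl ih =>
    simp only [List.foldl_cons, List.countP_cons]
    rw [pvA_step, ih]
    simp only [pvMk3, PySem.Dict.mk.injEq, List.cons.injEq, Prod.mk.injEq, true_and, and_true]
    refine ⟨?_, ?_, ?_⟩ <;> split_ifs <;> push_cast <;> ring

-- B's issue loop over one page: the count at any key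
lemma pvB_issues (issues : List (List (String × String))) (d : PySem.Dict (Option String) Int)
    (k : Option String) :
    ((issues.foldl (fun c issue =>
        if pvSev issue == some "HIGH" then c.modify (pvTyp issue) 0 (· + 1) else c) d).getD k 0)
    = d.getD k 0 + ((issues.countP (pvHit k)) : Int) := by
  induction issues generalizing d with
  | nil => simp
  | cons hd tl ih =>
    simp only [List.foldl_cons, List.countP_cons]
    by_cases hs : pvSev hd = some "HIGH"
    · simp only [hs, beq_self_eq_true, if_true]
      rw [ih, PySem.Dict.getD_modify]
      by_cases hk : k = pvTyp hd
      · have hb : pvHit k hd = true := by simp [pvHit, hs, hk]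
        simp only [if_pos hk, hb, if_true]
        rw [hk]; push_cast; ring
      · have hb : pvHit k hd = false := by
          simp only [pvHit, hs, beq_self_eq_true, Bool.true_and, beq_eq_false_iff_ne, ne_eq]
          exact fun h => hk h.symm
        simp only [if_neg hk, hb]
        push_cast; ring
    · have hcond : (pvSev hd == some "HIGH") = false := by simp [hs]
      have hb : pvHit k hd = false := by simp [pvHit, hcond]
      simp only [hcond, Bool.false_eq_true, if_false]
      rw [ih]
      simp [hb]

-- splitting the Heading count over the two member types
lemma pvCountP_split (issues : List (List (String × String))) :
    issues.countP (fun i => pvHit (some "H1") i || pvHit (some "H2") i)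
    = issues.countP (pvHit (some "H1")) + issues.countP (pvHit (some "H2")) := by
  induction issues with
  | nil => simp
  | cons hd tl ih =>
    have hx : ¬(pvHit (some "H1") hd = true ∧ pvHit (some "H2") hd = true) := by
      rintro ⟨h1, h2⟩
      simp only [pvHit, Bool.and_eq_true, beq_iff_eq] at h1 h2
      exact absurd (h1.2.symm.trans h2.2) (by simp)
    by_cases h1 : pvHit (some "H1") hd <;> by_cases h2 : pvHit (some "H2") hd <;>
      simp_all <;> omega

-- A's whole page loop
lemma pvA_data (data : List (List (String × List (List (String × String))))) (a b c : Int) :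
    (data.foldl (fun dr page =>
      (pvIss page).foldl (fun dr issue => pvStepA dr issue) dr) (pvMk3 a b c))
    = pvMk3 (a + (((data.flatMap pvIss).countP (fun i => pvHit (some "H1") i || pvHit (some "H2") i)) : Int))
            (b + (((data.flatMap pvIss).countP (pvHit (some "Canonical"))) : Int))
            (c + (((data.flatMap pvIss).countP (pvHit (some "Meta Description"))) : Int)) := by
  induction data generalizing a b c with
  | nil => simp
  | cons pg tl ih =>
    simp only [List.foldl_cons, List.flatMap_cons, List.countP_append]
    rw [pvA_issues, ih]
    simp only [pvMk3, PySem.Dict.mk.injEq, List.cons.injEq, Prod.mk.injEq, true_and, and_true]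
    refine ⟨?_, ?_, ?_⟩ <;> push_cast <;> ring

-- B's whole page loop: the count at any key
lemma pvB_data (data : List (List (String × List (List (String × String))))) (d : PySem.Dict (Option String) Int) (k : Option String) :
    ((data.foldl (fun c page =>
        (pvIss page).foldl (fun c issue =>
          if pvSev issue == some "HIGH" then c.modify (pvTyp issue) 0 (· + 1) else c) c) d).getD k 0)
    = d.getD k 0 + (((data.flatMap pvIss).countP (pvHit k)) : Int) := by
  induction data generalizing d with
  | nil => simp
  | cons pg tl ih =>
    simp only [List.foldl_cons, List.flatMap_cons, List.countP_append]
    rw [ih, pvB_issues]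
    push_cast
    ring

-- the two programs, written over the proof-side names
lemma pvMain (data : List (List (String × List (List (String × String))))) :
    (data.foldl (fun dr page =>
      (pvIss page).foldl (fun dr issue => pvStepA dr issue) dr) (pvMk3 0 0 0)).items
    = (let counts := data.foldl (fun c page =>
        (pvIss page).foldl (fun c issue =>
          if pvSev issue == some "HIGH" then c.modify (pvTyp issue) 0 (· + 1) else c) c)
        PySem.Dict.empty
      [("Heading", counts.getD (some "H1") 0 + counts.getD (some "H2") 0),
       ("Canonical", counts.getD (some "Canonical") 0),
       ("Meta Description", counts.getD (some "Meta Description") 0)]) := by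
  rw [pvA_data]
  simp only [pvB_data, pvMk3, PySem.Dict.getD_empty]
  simp only [pvCountP_split]
  push_cast
  ring_nf

-- ===== VERDICT (by name: the statement is the Claim_ definition above) =====
theorem get_drilldown_high_spec : Claim_equal_get_drilldown_high := by
  intro data _
  show get_drilldown_high data = get_drilldown_high_alt data
  exact pvMain data
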